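-- pv_equiv track=rewrite | github.com/kuras120/NeuralNetworks | games_theory/helper/default_predictor.py | generate_neighbour_states
-- ===== SOURCE A (Python) =====
-- def generate_neighbour_states(key: str):
--     neighbours = []
--     for i in range(len(key)):
--         copy = list(key)
--         if key[i] == 'N':
--             copy[i] = 'O'
--             neighbours.append(''.join(copy))
--     return neighbours
-- ===== SOURCE B (Python) =====
-- def generate_neighbour_states(key: str):
--     # Divide and conquer: neighbours of l + r are (neighbours of l) suffixed
--     # with r followed by (neighbours of r) prefixed with l.
--     n = len(key)
--     if n <= 1:
--         return ['O'] if key == 'N' else []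
--     mid = n // 2
--     left, right = key[:mid], key[mid:]
--     return [s + right for s in generate_neighbour_states(left)] + \
--            [left + s for s in generate_neighbour_states(right)]
-- ===== Notes on version B (the rewrite author's own statement) =====
-- stated objective: alternative
-- what changed: Replaces A's flat index scan with per-index full list copies by a divide-and-conquer recursion: split the string in half, recursively compute each half's neighbours, and combine by suffixing the right half onto the left results and prefixing the left half onto the right results.
import Mathlib
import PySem

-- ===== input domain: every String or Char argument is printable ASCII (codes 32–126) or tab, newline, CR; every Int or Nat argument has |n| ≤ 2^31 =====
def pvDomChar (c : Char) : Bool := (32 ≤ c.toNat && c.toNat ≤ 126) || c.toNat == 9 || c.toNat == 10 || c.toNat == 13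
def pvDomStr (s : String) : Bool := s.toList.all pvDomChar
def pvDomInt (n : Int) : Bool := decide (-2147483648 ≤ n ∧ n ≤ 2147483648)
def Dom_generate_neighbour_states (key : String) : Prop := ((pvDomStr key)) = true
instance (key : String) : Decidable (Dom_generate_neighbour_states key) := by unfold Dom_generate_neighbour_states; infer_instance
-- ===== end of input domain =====

-- B replaces A's flat index scan (a full list copy per index) by a divide-and-conquer
-- recursion on string halves that combines the halves' neighbour lists; same results.

-- ===== PORT A =====
def generate_neighbour_states (key : String) : List String :=
  (PySem.List.pyRange 0 (PySem.Str.len key) 1).foldl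
    (fun neighbours i =>
      let copy := key.toList
      if PySem.List.pyGet? copy i = some 'N' then
        neighbours ++ [String.mk (copy.set i.toNat 'O')]
      else neighbours) []

-- ===== PORT B =====
-- Source B's recursion, at the List Char level (strings become char lists, '+' on strings
-- becomes ++, and the nonnegative in-range slices key[:mid]/key[mid:] are exactly
-- List.take/List.drop; n // 2 on a nonnegative n is Nat division).
def gnsB (l : List Char) : List (List Char) :=
  if l.length ≤ 1 then
    if l = ['N'] then [['O']] else []
  else
    (gnsB (l.take (l.length / 2))).map (· ++ l.drop (l.length / 2)) ++
    (gnsB (l.drop (l.length / 2))).map (l.take (l.length / 2) ++ ·)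
termination_by l.length
decreasing_by
  · simp only [List.length_take]; omega
  · simp only [List.length_drop]; omega

def generate_neighbour_states_alt (key : String) : List String :=
  (gnsB key.toList).map String.mk

-- ===== PRECONDITION & SPEC =====
def Spec_generate_neighbour_states (key : String) (out : List String) : Prop := out = generate_neighbour_states_alt key
instance (key : String) (out : List String) : Decidable (Spec_generate_neighbour_states key out) := by unfold Spec_generate_neighbour_states; infer_instance

-- ===== CLAIM (what is proved, stated in full; the proofs are below) =====
def Claim_equal_generate_neighbour_states : Prop := ∀ (key : String), Dom_generate_neighbour_states key → Spec_generate_neighbour_states key (generate_neighbour_states key)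

-- ===== LEMMAS AND PROOFS =====

-- cons-structured reference: neighbour char lists in position order
def nb : List Char → List (List Char)
  | [] => []
  | c :: t => (if c = 'N' then [('O' :: t)] else []) ++ (nb t).map (c :: ·)

theorem nb_append (a b : List Char) :
    nb (a ++ b) = (nb a).map (· ++ b) ++ (nb b).map (a ++ ·) := by
  induction a with
  | nil => simp [nb]
  | cons c t ih =>
    by_cases hc : c = 'N' <;>
      simp [nb, hc, ih, List.map_map, Function.comp_def]

theorem gnsB_eq_nb : ∀ (n : Nat) (l : List Char), l.length ≤ n → gnsB l = nb l := by
  intro n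
  induction n with
  | zero =>
    intro l hl
    have : l = [] := List.eq_nil_of_length_eq_zero (by omega)
    subst this; rw [gnsB]; simp [nb]
  | succ n ih =>
    intro l hl
    by_cases h : l.length ≤ 1
    · match l, h with
      | [], _ => rw [gnsB]; simp [nb]
      | [c], _ =>
        rw [gnsB]
        by_cases hc : c = 'N' <;> simp [nb, hc]
    · rw [gnsB, if_neg h,
        ih (l.take (l.length / 2)) (by simp only [List.length_take]; omega),
        ih (l.drop (l.length / 2)) (by simp only [List.length_drop]; omega),
        ← nb_append, List.take_append_drop]

-- reference used for the A side: neighbours contributed by positions ≥ k, in order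
def nFrom (l : List Char) (k : Nat) : List String :=
  if h : k < l.length then
    (if l[k] = 'N' then [String.mk (l.set k 'O')] else []) ++ nFrom l (k + 1)
  else []
termination_by l.length - k

theorem nFrom_of_ge (l : List Char) (k : Nat) (h : l.length ≤ k) : nFrom l k = [] := by
  rw [nFrom]; simp [Nat.not_lt.mpr h]

theorem nFrom_of_lt (l : List Char) (k : Nat) (h : k < l.length) :
    nFrom l k = (if l[k] = 'N' then [String.mk (l.set k 'O')] else []) ++ nFrom l (k + 1) := by
  rw [nFrom]; simp [h]

-- A equals nFrom
theorem portA_loop (l : List Char) :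
    ∀ (n k : Nat), l.length - k ≤ n → ∀ acc : List String,
      (PySem.List.pyRange (k : Int) (l.length : Int) 1).foldl
        (fun neighbours i =>
          let copy := l
          if PySem.List.pyGet? copy i = some 'N' then
            neighbours ++ [String.mk (copy.set i.toNat 'O')]
          else neighbours) acc = acc ++ nFrom l k := by
  intro n
  induction n with
  | zero =>
    intro k hk acc
    have hle : l.length ≤ k := by omega
    rw [PySem.List.pyRange_one_eq_nil (by exact_mod_cast hle), nFrom_of_ge l k hle]
    simp
  | succ n ih =>
    intro k hk acc
    by_cases h : k < l.length
    · rw [PySem.List.pyRange_one_cons (by exact_mod_cast h)]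
      simp only [List.foldl_cons, PySem.List.pyGet?_natCast]
      have hcast : (k : Int) + 1 = ((k + 1 : Nat) : Int) := by push_cast; ring
      rw [hcast, ih (k + 1) (by omega), nFrom_of_lt l k h,
        List.getElem?_eq_getElem h]
      by_cases hN : l[k] = 'N' <;>
        simp [hN, List.append_assoc]
    · rw [PySem.List.pyRange_one_eq_nil (by exact_mod_cast (by omega : l.length ≤ k)),
        nFrom_of_ge l k (by omega)]
      simp

theorem portA_eq (key : String) : generate_neighbour_states key = nFrom key.toList 0 := by
  unfold generate_neighbour_states
  have := portA_loop key.toList key.toList.length 0 (by omega) []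
  simpa [PySem.Str.len_eq] using this

-- nFrom rendered through nb
theorem nFrom_eq_nb (l : List Char) :
    ∀ (n k : Nat), l.length - k ≤ n →
      nFrom l k = (nb (l.drop k)).map (fun s => String.mk (l.take k ++ s)) := by
  intro n
  induction n with
  | zero =>
    intro k hk
    rw [nFrom_of_ge l k (by omega), List.drop_eq_nil_of_le (by omega)]
    simp [nb]
  | succ n ih =>
    intro k hk
    by_cases h : k < l.length
    · rw [nFrom_of_lt l k h, List.drop_eq_getElem_cons h]
      show _ = (nb (l[k] :: l.drop (k + 1))).map _
      rw [nb]
      have htake : l.take (k + 1) = l.take k ++ [l[k]] := by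
        rw [List.take_succ, List.getElem?_eq_getElem h]; rfl
      have hset : String.mk (l.set k 'O') =
          String.mk (l.take k ++ 'O' :: l.drop (k + 1)) := by
        rw [List.set_eq_take_append_cons_drop, if_pos h]
      rw [ih (k + 1) (by omega)]
      simp only [List.map_append, List.map_map, Function.comp_def]
      congr 1
      · by_cases hN : l[k] = 'N' <;> simp [hN, hset]
      · refine List.map_congr_left fun s _ => ?_
        rw [htake, List.append_assoc, List.singleton_append]
    · rw [nFrom_of_ge l k (by omega), List.drop_eq_nil_of_le (by omega)]
      simp [nb]

theorem portB_eq (key : String) : generate_neighbour_states_alt key = nFrom key.toList 0 := by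
  unfold generate_neighbour_states_alt
  rw [gnsB_eq_nb key.toList.length key.toList le_rfl,
    nFrom_eq_nb key.toList key.toList.length 0 (by omega)]
  simp

-- ===== VERDICT (by name: the statement is the Claim_ definition above) =====
theorem generate_neighbour_states_spec : Claim_equal_generate_neighbour_states := by
  intro key _
  unfold Spec_generate_neighbour_states
  rw [portA_eq, portB_eq]
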